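-- pv_equiv track=rewrite | github.com/psychoinformatics-de/ClusteredNetwork_pub | utils/Helper/ParamField.py | DynIndex
-- ===== SOURCE A (Python) =====
-- def DynIndex(stop):
--     """
--     Generator function which yields indexing tuples dynamically of a N dimensional array.
--     Parameter:
--         stop: tuple of N numbers which represent the shape of the N dimensional array
--     """
--     dims = len(stop)
--     if not dims:
--         yield ()
--         return
--     for outer in DynIndex(stop[1:]):
--         for inner in range(0, stop[0]):
--             yield (inner,) + outer
-- ===== SOURCE B (Python) =====
-- def DynIndex(stop):
--     n = len(stop)
--     if any(s <= 0 for s in stop):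
--         return
--     idx = [0] * n
--     while True:
--         yield tuple(idx)
--         i = 0
--         while i < n and idx[i] == stop[i] - 1:
--             idx[i] = 0
--             i += 1
--         if i == n:
--             return
--         idx[i] += 1
-- ===== Notes on version B (the rewrite author's own statement) =====
-- stated objective: alternative
-- what changed: Replaced A's recursion over the shape's tail with an iterative odometer: an explicit counter list incremented first-digit-first with carry, reproducing the same column-major order and returning nothing as soon as any dimension is nonpositive.
import Mathlib
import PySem

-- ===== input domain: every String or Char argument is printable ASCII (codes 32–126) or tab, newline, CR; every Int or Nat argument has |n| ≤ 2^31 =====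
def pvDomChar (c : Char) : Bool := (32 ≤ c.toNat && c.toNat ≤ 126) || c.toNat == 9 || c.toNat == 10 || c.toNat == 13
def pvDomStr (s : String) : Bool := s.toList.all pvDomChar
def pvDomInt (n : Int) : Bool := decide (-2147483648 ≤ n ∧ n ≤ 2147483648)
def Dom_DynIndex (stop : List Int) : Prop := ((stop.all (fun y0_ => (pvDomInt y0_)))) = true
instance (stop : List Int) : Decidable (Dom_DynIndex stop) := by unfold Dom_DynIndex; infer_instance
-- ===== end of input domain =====

-- B replaces A's recursion with an iterative odometer: a counter list incremented
-- first-digit-first with carry (alternative decomposition; same column-major order).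

-- ===== PORT A =====
-- for outer in DynIndex(stop[1:]): for inner in range(0, stop[0]): yield (inner,) + outer
def DynIndex (stop : List Int) : List (List Int) :=
  match stop with
  | [] => [[]]
  | s :: rest =>
    (DynIndex rest).flatMap (fun outer =>
      (PySem.List.pyRange 0 s 1).map (fun inner => inner :: outer))

-- ===== PORT B =====
-- inner while loop of Source B: walk i upward while idx[i] == stop[i] - 1, zeroing digits;
-- returns none when the carry runs off the end (i == n, the generator stops).
def pvCarry (stop idx : List Int) : Option (List Int) :=
  match stop, idx with
  | s :: ss, i :: is =>
    if i = s - 1 then (pvCarry ss is).map (fun is' => 0 :: is')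
    else some ((i + 1) :: is)
  | _, _ => none

-- outer 'while True' loop of Source B, with fuel = the exact number of tuples produced
def pvRun (fuel : Nat) (stop idx : List Int) : List (List Int) :=
  match fuel with
  | 0 => []
  | fuel + 1 =>
    idx :: (match pvCarry stop idx with
            | none => []
            | some idx' => pvRun fuel stop idx')

def DynIndex_alt (stop : List Int) : List (List Int) :=
  if stop.any (fun s => decide (s ≤ 0)) then []
  else pvRun ((stop.map Int.toNat).prod) stop (stop.map (fun _ => 0))

-- ===== PRECONDITION & SPEC =====
def Spec_DynIndex (stop : List Int) (out : List (List Int)) : Prop := out = DynIndex_alt stop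
instance (stop : List Int) (out : List (List Int)) : Decidable (Spec_DynIndex stop out) := by unfold Spec_DynIndex; infer_instance

-- ===== CLAIM (what is proved, stated in full; the proofs are below) =====
def Claim_equal_DynIndex : Prop := ∀ (stop : List Int), Dom_DynIndex stop → Spec_DynIndex stop (DynIndex stop)

-- ===== LEMMAS AND PROOFS =====

-- A yields nothing as soon as some dimension is ≤ 0
theorem DynIndex_eq_nil_of_nonpos (stop : List Int) (h : ∃ s ∈ stop, s ≤ 0) :
    DynIndex stop = [] := by
  induction stop with
  | nil => simp at h
  | cons s ss ih =>
    rcases h with ⟨t, ht, hle⟩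
    rcases List.mem_cons.mp ht with rfl | hmem
    · have : PySem.List.pyRange 0 t 1 = [] := by
        simp [PySem.List.pyRange_one]
        omega
      simp [DynIndex, this]
    · simp [DynIndex, ih ⟨t, hmem, hle⟩]

-- running one digit: k remaining steps in the first coordinate, then carry into the rest
theorem pvRun_digit (s : Int) (ss : List Int) (k : Nat) (hk : 1 ≤ k) :
    ∀ (f : Nat) (outer : List Int),
    pvRun (k + f) (s :: ss) ((s - (k : Int)) :: outer) =
      ((PySem.List.pyRange (s - (k : Int)) s 1).map (fun i => i :: outer)) ++
        (match pvCarry ss outer with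
         | none => []
         | some outer' => pvRun f (s :: ss) (0 :: outer')) := by
  induction k with
  | zero => omega
  | succ k ih =>
    intro f outer
    by_cases hk1 : k = 0
    · subst hk1
      simp only [Nat.cast_one, zero_add]
      have hrange : PySem.List.pyRange (s - 1) s 1 = [s - 1] := by
        have hc : PySem.List.pyRange (s - 1) s 1 = (s - 1) :: PySem.List.pyRange (s - 1 + 1) s 1 :=
          PySem.List.pyRange_one_cons (by omega)
        rw [hc]
        simp
      rw [show (0:Nat) + 1 + f = f + 1 from by omega]
      simp only [pvRun, pvCarry, hrange]
      cases h : pvCarry ss outer with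
      | none => simp
      | some outer' => simp
    · have hk' : 1 ≤ k := Nat.one_le_iff_ne_zero.mpr hk1
      have hlt : s - ((k : Int) + 1) ≠ s - 1 := by
        intro h
        have : (k : Int) = 0 := by omega
        exact hk1 (by exact_mod_cast this)
      have hidx : s - (((k:Nat) + 1 : Nat) : Int) + 1 = s - (k : Int) := by push_cast; ring
      have hcons : PySem.List.pyRange (s - (((k:Nat) + 1 : Nat) : Int)) s 1 =
          (s - (((k:Nat) + 1 : Nat) : Int)) :: PySem.List.pyRange (s - (k : Int)) s 1 := by
        rw [← hidx]
        exact PySem.List.pyRange_one_cons (by push_cast; omega)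
      rw [show k + 1 + f = (k + f) + 1 from by omega]
      simp only [pvRun, pvCarry]
      rw [if_neg (by push_cast at hlt ⊢; exact hlt)]
      rw [show s - (((k:Nat) + 1 : Nat) : Int) + 1 = s - (k : Int) from hidx]
      have hred : (match some ((s - (k:Int)) :: outer) with
          | none => ([] : List (List Int))
          | some idx' => pvRun (k + f) (s :: ss) idx') =
          pvRun (k + f) (s :: ss) ((s - (k:Int)) :: outer) := rfl
      rw [hred, ih hk' f outer, hcons]
      simp

-- composing digits: first-coordinate loop around the orbit of the remaining digits
theorem pvRun_comp (s : Int) (ss : List Int) (hs : 0 < s) :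
    ∀ (m : Nat) (outer : List Int),
    pvRun (s.toNat * m) (s :: ss) (0 :: outer) =
      (pvRun m ss outer).flatMap (fun o => (PySem.List.pyRange 0 s 1).map (fun i => i :: o)) := by
  intro m
  induction m with
  | zero => simp [pvRun]
  | succ m ih =>
    intro outer
    have hk : 1 ≤ s.toNat := by omega
    have hzero : (0 : Int) = s - (s.toNat : Int) := by omega
    rw [show s.toNat * (m + 1) = s.toNat + s.toNat * m from by ring]
    rw [hzero, pvRun_digit s ss s.toNat hk (s.toNat * m) outer, ← hzero]
    cases h : pvCarry ss outer with
    | none => simp [pvRun, h]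
    | some outer' =>
      simp only [pvRun, h]
      rw [ih outer']
      simp

theorem pvRun_zeros (stop : List Int) (hpos : ∀ s ∈ stop, 0 < s) :
    pvRun ((stop.map Int.toNat).prod) stop (stop.map (fun _ => 0)) = DynIndex stop := by
  induction stop with
  | nil => simp [pvRun, pvCarry, DynIndex]
  | cons s ss ih =>
    have hs : 0 < s := hpos s (List.mem_cons_self)
    have hss : ∀ t ∈ ss, 0 < t := fun t ht => hpos t (List.mem_cons_of_mem _ ht)
    simp only [List.map_cons, List.prod_cons]
    rw [pvRun_comp s ss hs ((ss.map Int.toNat).prod) (ss.map (fun _ => 0)), ih hss]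
    simp [DynIndex]

theorem DynIndex_eq_alt (stop : List Int) : DynIndex stop = DynIndex_alt stop := by
  unfold DynIndex_alt
  split_ifs with h
  · apply DynIndex_eq_nil_of_nonpos
    simp only [List.any_eq_true, decide_eq_true_eq] at h
    exact h
  · apply (pvRun_zeros stop _).symm
    intro t ht
    simp only [List.any_eq_true, decide_eq_true_eq] at h
    push Not at h
    exact h t ht

-- ===== VERDICT (by name: the statement is the Claim_ definition above) =====
theorem DynIndex_spec : Claim_equal_DynIndex := by
  intro stop _
  exact DynIndex_eq_alt stop
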